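-- pv_equiv track=rewrite | github.com/looklee/study2026 | apps/api/app/services/progress_service.py | generate_motivation
-- ===== SOURCE A (Python) =====
-- def generate_motivation(progress: int) -> str:
--     """生成激励消息"""
--     messages = [
--         (0, "🌱 开始你的学习之旅吧！"),
--         (25, "💪 不错的开始，继续保持！"),
--         (50, "🎯 已经过半了，加油！"),
--         (75, "🔥 胜利在望，冲刺！"),
--         (100, "🏆 恭喜完成！你是最棒的！")
--     ]
--
--     for threshold, message in reversed(messages):
--         if progress >= threshold:
--             return message
--     return messages[0][1]
-- ===== SOURCE B (Python) =====
-- def generate_motivation(progress: int) -> str: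
--     """生成激励消息"""
--     messages = [
--         "🌱 开始你的学习之旅吧！",
--         "💪 不错的开始，继续保持！",
--         "🎯 已经过半了，加油！",
--         "🔥 胜利在望，冲刺！",
--         "🏆 恭喜完成！你是最棒的！",
--     ]
--     idx = max(0, min(progress // 25, 4))
--     return messages[idx]
-- ===== Notes on version B (the rewrite author's own statement) =====
-- stated objective: simpler
-- what changed: Replaces the reversed-list threshold scan with a direct clamped bucket index (floor division by the uniform threshold spacing) into the message list.
import Mathlib
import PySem

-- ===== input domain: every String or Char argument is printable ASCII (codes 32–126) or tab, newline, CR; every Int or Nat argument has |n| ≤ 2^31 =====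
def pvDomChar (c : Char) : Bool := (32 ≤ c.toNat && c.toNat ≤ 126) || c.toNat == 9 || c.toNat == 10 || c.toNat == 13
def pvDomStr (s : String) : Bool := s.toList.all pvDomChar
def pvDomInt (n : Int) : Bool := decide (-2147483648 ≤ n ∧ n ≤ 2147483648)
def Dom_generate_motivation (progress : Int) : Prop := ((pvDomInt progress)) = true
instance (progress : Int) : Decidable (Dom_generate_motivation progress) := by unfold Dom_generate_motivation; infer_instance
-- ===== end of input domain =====

-- B replaces A's reversed threshold scan by a direct clamped bucket index progress // 25 (simpler, O(1)).

-- ===== PORT A =====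
def gmMessages : List (Int × String) :=
  [(0, "🌱 开始你的学习之旅吧！"),
   (25, "💪 不错的开始，继续保持！"),
   (50, "🎯 已经过半了，加油！"),
   (75, "🔥 胜利在望，冲刺！"),
   (100, "🏆 恭喜完成！你是最棒的！")]

-- the 'for … in reversed(messages): if progress >= threshold: return message' loop
def gmScan (progress : Int) : List (Int × String) → Option String
  | [] => none
  | (t, m) :: rest => if progress ≥ t then some m else gmScan progress rest

def generate_motivation (progress : Int) : String :=
  match gmScan progress gmMessages.reverse with
  | some m => m
  | none => (PySem.List.pyGetD gmMessages 0 (0, "")).2   -- messages[0][1]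

-- ===== PORT B =====
def gmAltMessages : List String :=
  ["🌱 开始你的学习之旅吧！",
   "💪 不错的开始，继续保持！",
   "🎯 已经过半了，加油！",
   "🔥 胜利在望，冲刺！",
   "🏆 恭喜完成！你是最棒的！"]

def generate_motivation_alt (progress : Int) : String :=
  let idx := max 0 (min (PySem.Int.floordiv progress 25) 4)
  PySem.List.pyGetD gmAltMessages idx ""

-- ===== PRECONDITION & SPEC =====
def Spec_generate_motivation (progress : Int) (out : String) : Prop := out = generate_motivation_alt progress
instance (progress : Int) (out : String) : Decidable (Spec_generate_motivation progress out) := by unfold Spec_generate_motivation; infer_instance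

-- ===== CLAIM (what is proved, stated in full; the proofs are below) =====
def Claim_equal_generate_motivation : Prop := ∀ (progress : Int), Dom_generate_motivation progress → Spec_generate_motivation progress (generate_motivation progress)

-- ===== LEMMAS AND PROOFS =====
theorem gm_eq (p : Int) : generate_motivation p = generate_motivation_alt p := by
  have hd : PySem.Int.floordiv p 25 = p / 25 := PySem.Int.floordiv_eq_ediv_of_pos (by omega)
  unfold generate_motivation generate_motivation_alt gmScan gmMessages gmAltMessages
  rw [hd]
  simp only [List.reverse_cons, List.reverse_nil, List.nil_append, List.cons_append]
  by_cases h1 : p ≥ 100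
  · have : max 0 (min (p / 25) 4) = 4 := by omega
    simp [h1, this, PySem.List.pyGetD]
  · by_cases h2 : p ≥ 75
    · have : max 0 (min (p / 25) 4) = 3 := by omega
      simp [gmScan, h1, h2, this, PySem.List.pyGetD]
    · by_cases h3 : p ≥ 50
      · have : max 0 (min (p / 25) 4) = 2 := by omega
        simp [gmScan, h1, h2, h3, this, PySem.List.pyGetD]
      · by_cases h4 : p ≥ 25
        · have : max 0 (min (p / 25) 4) = 1 := by omega
          simp [gmScan, h1, h2, h3, h4, this, PySem.List.pyGetD]
        · have : max 0 (min (p / 25) 4) = 0 := by omega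
          by_cases h5 : p ≥ 0 <;>
            simp [gmScan, h1, h2, h3, h4, h5, this, PySem.List.pyGetD]

-- ===== VERDICT (by name: the statement is the Claim_ definition above) =====
theorem generate_motivation_spec : Claim_equal_generate_motivation := by
  intro p _
  exact gm_eq p
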